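-- pv_equiv track=rewrite | github.com/PrinceRaj354/BT_Group_Bootcamp | challenges/challenge_38_fibonacci_pattern/fibonacci_pattern_38.py | generate_fibonacci_pattern
-- ===== SOURCE A (Python) =====
-- def generate_fibonacci_pattern(n):
--     if n <= 0:
--         return []
--
--     result = []
--     fib = [1, 1]
--
--     for row in range(1, n + 1):
--         while len(fib) < sum(range(1, row + 1)):
--             fib.append(fib[-1] + fib[-2])
--
--         start = sum(range(1, row))
--         end = start + row
--         result.append(" ".join(str(x) for x in fib[start:end]))
--
--     return result
-- ===== SOURCE B (Python) =====
-- def generate_fibonacci_pattern(n):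
--     result = []
--     a, b = 1, 1
--     for row in range(1, n + 1):
--         nums = []
--         for _ in range(row):
--             nums.append(a)
--             a, b = b, a + b
--         result.append(" ".join(str(x) for x in nums))
--     return result
-- ===== Notes on version B (the rewrite author's own statement) =====
-- stated objective: simpler
-- what changed: Drops the materialized fib list, the per-row while-loop extension, the sum(range(...)) triangular-index arithmetic and the slicing, and instead streams a rolling scalar pair (a, b) that emits exactly `row` numbers per row.
import Mathlib
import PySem

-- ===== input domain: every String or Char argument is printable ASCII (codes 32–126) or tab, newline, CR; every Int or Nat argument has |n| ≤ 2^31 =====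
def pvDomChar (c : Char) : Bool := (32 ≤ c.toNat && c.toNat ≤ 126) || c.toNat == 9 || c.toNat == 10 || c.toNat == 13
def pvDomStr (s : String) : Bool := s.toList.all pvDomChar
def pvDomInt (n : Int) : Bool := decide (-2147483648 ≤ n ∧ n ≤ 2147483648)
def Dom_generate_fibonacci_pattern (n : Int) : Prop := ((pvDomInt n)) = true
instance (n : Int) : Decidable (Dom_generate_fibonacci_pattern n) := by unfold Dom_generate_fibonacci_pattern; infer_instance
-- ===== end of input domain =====

-- B replaces A's materialized fib list, sum(range) index arithmetic and slicing by a rolling scalar pair (simpler).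

-- ===== PORT A =====
-- the 'while len(fib) < target: fib.append(fib[-1] + fib[-2])' loop
-- (fib[-1] / fib[-2] via pyGetD: the list always has length ≥ 2, so the default is never used)
def fibExtend (target : Int) (fib : List Int) : List Int :=
  if (fib.length : Int) < target then
    fibExtend target (fib ++ [PySem.List.pyGetD fib (-1) 0 + PySem.List.pyGetD fib (-2) 0])
  else fib
termination_by (target - fib.length).toNat
decreasing_by simp; omega

def generate_fibonacci_pattern (n : Int) : List String :=
  if n ≤ 0 then []
  else
    ((PySem.List.pyRange 1 (n + 1) 1).foldl
      (fun (st : List String × List Int) row =>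
        let fib := fibExtend (PySem.List.pyRange 1 (row + 1) 1).sum st.2
        let start := (PySem.List.pyRange 1 row 1).sum
        let stop := start + row
        (st.1 ++ [PySem.Str.join " "
            ((PySem.List.slice fib (some start) (some stop)).map PySem.Int.toStr)],
         fib))
      ([], [1, 1])).1

-- ===== PORT B =====
def generate_fibonacci_pattern_alt (n : Int) : List String :=
  ((PySem.List.pyRange 1 (n + 1) 1).foldl
    (fun (st : List String × Int × Int) row =>
      let inner := (PySem.List.pyRange 0 row 1).foldl
        (fun (s : List Int × Int × Int) _ => (s.1 ++ [s.2.1], s.2.2, s.2.1 + s.2.2))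
        ([], st.2.1, st.2.2)
      (st.1 ++ [PySem.Str.join " " (inner.1.map PySem.Int.toStr)], inner.2))
    ([], 1, 1)).1

-- ===== PRECONDITION & SPEC =====
def Spec_generate_fibonacci_pattern (n : Int) (out : List String) : Prop := out = generate_fibonacci_pattern_alt n
instance (n : Int) (out : List String) : Decidable (Spec_generate_fibonacci_pattern n out) := by unfold Spec_generate_fibonacci_pattern; infer_instance

-- ===== CLAIM (what is proved, stated in full; the proofs are below) =====
def Claim_equal_generate_fibonacci_pattern : Prop := ∀ (n : Int), Dom_generate_fibonacci_pattern n → Spec_generate_fibonacci_pattern n (generate_fibonacci_pattern n)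

-- ===== LEMMAS AND PROOFS =====

-- the Fibonacci sequence both programs enumerate (1, 1, 2, 3, 5, …), and its prefix lists
def fibSeq : Nat → Int
  | 0 => 1
  | 1 => 1
  | (k + 2) => fibSeq k + fibSeq (k + 1)

def fibOf (m : Nat) : List Int := (List.range m).map fibSeq

-- triangular numbers: the value of A's sum(range(1, k + 1))
def triN : Nat → Nat
  | 0 => 0
  | (k + 1) => triN k + (k + 1)

theorem sum_pyRange_tri (m : Nat) :
    (PySem.List.pyRange 1 ((m : Int) + 1) 1).sum = (triN m : Int) := by
  induction m with
  | zero => simp [PySem.List.pyRange_one_eq_nil, triN]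
  | succ k ih =>
    rw [show ((k + 1 : Nat) : Int) + 1 = ((k : Int) + 1) + 1 by push_cast; ring,
      PySem.List.pyRange_one_succ_right (by omega)]
    simp [ih, triN]

theorem fibOf_succ (m : Nat) : fibOf (m + 1) = fibOf m ++ [fibSeq m] := by
  simp [fibOf, List.range_succ]

-- fib[-1] + fib[-2] is the next Fibonacci number
theorem fibExtend0 (m : Nat) (h2 : 2 ≤ m) :
    PySem.List.pyGetD (fibOf m) (-1) 0 + PySem.List.pyGetD (fibOf m) (-2) 0 = fibSeq m := by
  have hl : (fibOf m).length = m := by simp [fibOf]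
  rw [PySem.List.pyGetD_neg_ofNat (fibOf m) 1 0 (by omega) (by simp [hl]; omega),
      PySem.List.pyGetD_neg_ofNat (fibOf m) 2 0 (by omega) (by simp [hl]; omega)]
  obtain ⟨p, rfl⟩ : ∃ p, m = p + 2 := ⟨m - 2, by omega⟩
  simp [fibOf]
  rw [show fibSeq (p + 2) = fibSeq p + fibSeq (p + 1) from rfl]
  ring

-- A's while loop extends a Fibonacci prefix to the target length
theorem fibExtend_spec (d : Nat) : ∀ (m t : Nat), 2 ≤ m → t - m = d →
    fibExtend (t : Int) (fibOf m) = fibOf (max m t) := by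
  induction d with
  | zero =>
    intro m t h2 hd
    rw [fibExtend]
    have hl : (fibOf m).length = m := by simp [fibOf]
    rw [if_neg (by rw [hl]; omega)]
    congr 1; omega
  | succ d ih =>
    intro m t h2 hd
    rw [fibExtend]
    have hl : (fibOf m).length = m := by simp [fibOf]
    rw [if_pos (by rw [hl]; exact_mod_cast by omega)]
    rw [fibExtend0 m h2, ← fibOf_succ]
    rw [ih (m + 1) t (by omega) (by omega)]
    congr 1; omega

-- B's inner loop streams a Fibonacci segment from a rolling pair
theorem innerfold_spec (l : List Int) : ∀ (acc : List Int) (p : Nat),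
    l.foldl (fun (s : List Int × Int × Int) _ => (s.1 ++ [s.2.1], s.2.2, s.2.1 + s.2.2))
      (acc, fibSeq p, fibSeq (p + 1))
    = (acc ++ (List.range l.length).map (fun j => fibSeq (p + j)),
       fibSeq (p + l.length), fibSeq (p + l.length + 1)) := by
  induction l with
  | nil => simp
  | cons x l ih =>
    intro acc p
    simp only [List.foldl_cons]
    rw [show fibSeq p + fibSeq (p + 1) = fibSeq ((p + 1) + 1) from (by rfl)]
    rw [ih (acc ++ [fibSeq p]) (p + 1)]
    simp [List.range_succ_eq_map, List.map_map, Function.comp]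
    refine ⟨?_, ?_, ?_⟩
    · intro a _; congr 1; omega
    · congr 1; omega
    · congr 1; omega

-- A's slice of the Fibonacci prefix is the same segment
theorem slice_fibOf (L s r : Nat) (h : s + r ≤ L) :
    PySem.List.slice (fibOf L) (some (s : Int)) (some ((s : Int) + (r : Int)))
    = (List.range r).map (fun j => fibSeq (s + j)) := by
  rw [PySem.List.slice_natCast_add]
  apply List.ext_getElem
  · simp [fibOf]; omega
  · intro i h1 h2
    simp [fibOf]

theorem main_loop (j : Nat) : ∀ (k : Nat) (res : List String),
    ((PySem.List.pyRange ((k : Int) + 1) ((k : Int) + 1 + (j : Int)) 1).foldl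
      (fun (st : List String × List Int) row =>
        let fib := fibExtend (PySem.List.pyRange 1 (row + 1) 1).sum st.2
        let start := (PySem.List.pyRange 1 row 1).sum
        let stop := start + row
        (st.1 ++ [PySem.Str.join " "
            ((PySem.List.slice fib (some start) (some stop)).map PySem.Int.toStr)],
         fib))
      (res, fibOf (max 2 (triN k)))).1
    = ((PySem.List.pyRange ((k : Int) + 1) ((k : Int) + 1 + (j : Int)) 1).foldl
      (fun (st : List String × Int × Int) row =>
        let inner := (PySem.List.pyRange 0 row 1).foldl
          (fun (s : List Int × Int × Int) _ => (s.1 ++ [s.2.1], s.2.2, s.2.1 + s.2.2))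
          ([], st.2.1, st.2.2)
        (st.1 ++ [PySem.Str.join " " (inner.1.map PySem.Int.toStr)], inner.2))
      (res, fibSeq (triN k), fibSeq (triN k + 1))).1 := by
  induction j with
  | zero =>
    intro k res
    rw [PySem.List.pyRange_one_eq_nil (by omega)]
    simp
  | succ j ih =>
    intro k res
    rw [PySem.List.pyRange_one_cons (by push_cast; omega)]
    simp only [List.foldl_cons]
    have e1 : (PySem.List.pyRange 1 (((k : Int) + 1) + 1) 1).sum = (triN (k + 1) : Int) := by
      rw [show ((k : Int) + 1) + 1 = ((k + 1 : Nat) : Int) + 1 by push_cast; ring,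
          sum_pyRange_tri]
    have e2 : fibExtend ((triN (k + 1) : Nat) : Int) (fibOf (max 2 (triN k)))
        = fibOf (max 2 (triN (k + 1))) := by
      rw [fibExtend_spec (triN (k + 1) - max 2 (triN k)) _ _ (le_max_left _ _) rfl]
      have : triN (k + 1) = triN k + (k + 1) := rfl
      congr 1; omega
    have e3 : (PySem.List.pyRange 1 ((k : Int) + 1) 1).sum = (triN k : Int) :=
      sum_pyRange_tri k
    have e4 : PySem.List.slice (fibOf (max 2 (triN (k + 1)))) (some ((triN k : Nat) : Int))
        (some (((triN k : Nat) : Int) + ((k : Int) + 1)))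
        = (List.range (k + 1)).map (fun j => fibSeq (triN k + j)) := by
      rw [show (k : Int) + 1 = ((k + 1 : Nat) : Int) by push_cast; ring]
      have : triN (k + 1) = triN k + (k + 1) := rfl
      exact slice_fibOf _ _ _ (by omega)
    have e5 := innerfold_spec (PySem.List.pyRange 0 ((k : Int) + 1) 1) [] (triN k)
    have e6 : (PySem.List.pyRange 0 ((k : Int) + 1) 1).length = k + 1 := by
      rw [PySem.List.length_pyRange_one]; omega
    rw [e6] at e5
    simp only [e1, e2, e3, e4, e5, List.nil_append]
    rw [show triN k + (k + 1) = triN (k + 1) from rfl]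
    have := ih (k + 1) (res ++ [PySem.Str.join " "
      ((List.map (fun j => fibSeq (triN k + j)) (List.range (k + 1))).map PySem.Int.toStr)])
    rw [show ((k + 1 : Nat) : Int) + 1 = (k : Int) + 1 + 1 by push_cast; ring] at this
    rw [show (k : Int) + 1 + ((j + 1 : Nat) : Int) = (k : Int) + 1 + 1 + (j : Int) by push_cast; ring]
    exact this

-- ===== VERDICT (by name: the statement is the Claim_ definition above) =====
theorem generate_fibonacci_pattern_spec : Claim_equal_generate_fibonacci_pattern := by
  intro n _
  unfold Spec_generate_fibonacci_pattern generate_fibonacci_pattern generate_fibonacci_pattern_alt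
  by_cases hn : n ≤ 0
  · simp [hn, PySem.List.pyRange_one_eq_nil (by omega : n + 1 ≤ 1)]
  · simp only [hn, if_false]
    have H := main_loop n.toNat 0 []
    rw [show ((0 : Nat) : Int) + 1 = (1 : Int) by simp,
        show (1 : Int) + (n.toNat : Int) = n + 1 by omega,
        show fibOf (max 2 (triN 0)) = [1, 1] by decide,
        show fibSeq (triN 0) = 1 from rfl,
        show fibSeq (triN 0 + 1) = 1 from rfl] at H
    exact H
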